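-- pv_equiv track=rewrite | github.com/rafaelperazzo/programacao-web | moodledata/vpl_data/332/usersdata/292/94130/submittedfiles/pico.py | pic
-- ===== SOURCE A (Python) =====
-- def pic(j):
--     cont, cont1 = 0, 0
--     for i in range(2, len(j)+1):
--         k1 = j[:i]
--         k2 = []
--         for k in k1:
--             k2.append(k)
--         k1.sort()
--         if (k1 == k2):
--             cont = i
--
--         else:
--             break
--
--     for i in range(1, len(j)):
--         if (j[i] == j[i-1]):
--             cont1 += 1
--
--     if (cont == 0) or (cont == len(j)) or (cont1 != 0):
--         return "N"
--
--     else: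
--         k3 = j[cont-1:]
--         k4 = []
--         for k in k3:
--             k4.append(k)
--         k3.sort()
--         k3.reverse()
--         if (k3 == k4):
--             return "S"
--
--         else:
--             return "N"
-- ===== SOURCE B (Python) =====
-- def pic(j):
--     # Single O(n) scan: climb the strictly increasing prefix, then require a
--     # strictly decreasing run covering the rest of the list.
--     n = len(j)
--     i = 1
--     while i < n and j[i] > j[i - 1]:
--         i += 1
--     if i == 1 or i == n:
--         return "N"
--     while i < n and j[i] < j[i - 1]:
--         i += 1
--     return "S" if i == n else "N"
-- ===== Notes on version B (the rewrite author's own statement) =====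
-- stated objective: faster
-- what changed: A copies and sorts every prefix to find the longest non-decreasing prefix and sorts the suffix to test descent; B makes one linear two-phase index scan (climb the strictly increasing prefix, then require a strictly decreasing run to the end).
import Mathlib
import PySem

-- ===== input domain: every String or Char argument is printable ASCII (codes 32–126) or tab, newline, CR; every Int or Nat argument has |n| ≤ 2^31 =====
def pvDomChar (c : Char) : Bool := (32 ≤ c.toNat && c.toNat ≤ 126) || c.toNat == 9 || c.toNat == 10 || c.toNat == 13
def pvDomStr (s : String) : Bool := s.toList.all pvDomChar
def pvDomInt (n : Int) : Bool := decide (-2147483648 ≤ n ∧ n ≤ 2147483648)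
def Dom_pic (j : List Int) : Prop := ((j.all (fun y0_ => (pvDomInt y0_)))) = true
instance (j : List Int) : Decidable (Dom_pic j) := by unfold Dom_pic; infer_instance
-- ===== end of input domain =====

-- B replaces A's copy-and-sort of every prefix (and of the suffix) by a single
-- linear two-phase index scan; same return value everywhere.

-- ===== PORT A =====
-- the 'for k in k1: k2.append(k)' copy loop
def picCopy (k1 : List Int) : List Int := List.foldl (fun acc k => acc ++ [k]) [] k1

-- 'for i in range(2, len(j)+1): … else: break', carrying cont
def picLoop1 (j : List Int) (i : Nat) (cont : Int) : Int :=
  if i < j.length + 1 then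
    let k1 := PySem.List.slice j none (some (i : Int))
    let k2 := picCopy k1
    if PySem.List.sorted k1 (fun x => x) = k2 then picLoop1 j (i + 1) (i : Int) else cont
  else cont
termination_by j.length + 1 - i

def pic (j : List Int) : String :=
  let cont := picLoop1 j 2 0
  let cont1 := (PySem.List.pyRange 1 (j.length : Int) 1).foldl
      (fun c i => if PySem.List.pyGetD j i 0 = PySem.List.pyGetD j (i - 1) 0 then c + 1 else c) (0 : Int)
  if cont = 0 ∨ cont = (j.length : Int) ∨ cont1 ≠ 0 then "N"
  else
    let k3 := PySem.List.slice j (some (cont - 1)) none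
    let k4 := picCopy k3
    if (PySem.List.sorted k3 (fun x => x)).reverse = k4 then "S" else "N"

-- ===== PORT B =====
-- 'while i < n and j[i] > j[i-1]: i += 1'
def picUp (j : List Int) (i : Nat) : Nat :=
  if i < j.length ∧ PySem.List.pyGetD j ((i : Int) - 1) 0 < PySem.List.pyGetD j (i : Int) 0
  then picUp j (i + 1) else i
termination_by j.length - i

-- 'while i < n and j[i] < j[i-1]: i += 1'
def picDown (j : List Int) (i : Nat) : Nat :=
  if i < j.length ∧ PySem.List.pyGetD j (i : Int) 0 < PySem.List.pyGetD j ((i : Int) - 1) 0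
  then picDown j (i + 1) else i
termination_by j.length - i

def pic_alt (j : List Int) : String :=
  let n := j.length
  let i := picUp j 1
  if i = 1 ∨ i = n then "N"
  else if picDown j i = n then "S" else "N"

-- ===== PRECONDITION & SPEC =====
def Spec_pic (j : List Int) (out : String) : Prop := out = pic_alt j
instance (j : List Int) (out : String) : Decidable (Spec_pic j out) := by unfold Spec_pic; infer_instance

-- ===== CLAIM (what is proved, stated in full; the proofs are below) =====
def Claim_equal_pic : Prop := ∀ (j : List Int), Dom_pic j → Spec_pic j (pic j)

-- ===== LEMMAS AND PROOFS =====

-- no two adjacent equal elements (A's second loop counts exactly these)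
def NoDup2 (j : List Int) : Prop :=
  ∀ t : Nat, 0 < t → t < j.length → j.getD t 0 ≠ j.getD (t - 1) 0

-- strictly increasing at all adjacent positions [a, b)
def UpOn (j : List Int) (a b : Nat) : Prop :=
  ∀ t : Nat, a ≤ t → t < b → j.getD (t - 1) 0 < j.getD t 0

lemma pyGetD_pred (j : List Int) (i : Nat) (h : 1 ≤ i) :
    PySem.List.pyGetD j ((i : Int) - 1) 0 = j.getD (i - 1) 0 := by
  have h2 : ((i : Int) - 1) = ((i - 1 : Nat) : Int) := by omega
  rw [h2]
  exact PySem.List.pyGetD_natCast j (i - 1) 0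

lemma up_ge (j : List Int) (i : Nat) : i ≤ picUp j i := by
  induction i using picUp.induct j with
  | case1 x h ih => rw [picUp, if_pos h]; omega
  | case2 x h => rw [picUp, if_neg h]

lemma up_le (j : List Int) (i : Nat) (h : i ≤ j.length) : picUp j i ≤ j.length := by
  induction i using picUp.induct j with
  | case1 x hc ih => rw [picUp, if_pos hc]; exact ih (by omega)
  | case2 x hc => rw [picUp, if_neg hc]; exact h

lemma up_chain (j : List Int) (i : Nat) : 1 ≤ i → UpOn j i (picUp j i) := by
  induction i using picUp.induct j with
  | case1 x hc ih =>
    intro h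
    rw [picUp, if_pos hc]
    intro t ht1 ht2
    rcases Nat.eq_or_lt_of_le ht1 with rfl | hlt
    · rw [pyGetD_pred j x h, PySem.List.pyGetD_natCast j x 0] at hc
      exact hc.2
    · exact ih (by omega) t hlt ht2
  | case2 x hc =>
    intro h
    rw [picUp, if_neg hc]
    intro t ht1 ht2; omega

lemma down_chain (j : List Int) (i : Nat) : 1 ≤ i →
    ∀ t : Nat, i ≤ t → t < picDown j i → j.getD t 0 < j.getD (t - 1) 0 := by
  induction i using picDown.induct j with
  | case1 x hc ih =>
    intro h
    rw [picDown, if_pos hc]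
    intro t ht1 ht2
    rcases Nat.eq_or_lt_of_le ht1 with rfl | hlt
    · rw [pyGetD_pred j x h, PySem.List.pyGetD_natCast j x 0] at hc
      exact hc.2
    · exact ih (by omega) t hlt ht2
  | case2 x hc =>
    intro h
    rw [picDown, if_neg hc]
    intro t ht1 ht2; omega

lemma down_full (j : List Int) (i : Nat) : 1 ≤ i → i ≤ j.length →
    (∀ t : Nat, i ≤ t → t < j.length → j.getD t 0 < j.getD (t - 1) 0) →
    picDown j i = j.length := by
  induction i using picDown.induct j with
  | case1 x hc ih =>
    intro h1 h2 hp
    rw [picDown, if_pos hc]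
    exact ih (by omega) (by omega) (fun t ht1 ht2 => hp t (by omega) ht2)
  | case2 x hc =>
    intro h1 h2 hp
    rw [picDown, if_neg hc]
    by_contra hne
    have hx : x < j.length := by omega
    have hv := hp x (le_refl x) hx
    rw [← PySem.List.pyGetD_natCast j x 0, ← pyGetD_pred j x h1] at hv
    exact hc ⟨hx, hv⟩

lemma down_eq_iff (j : List Int) (i : Nat) (h1 : 1 ≤ i) (h2 : i ≤ j.length) :
    picDown j i = j.length ↔ ∀ t : Nat, i ≤ t → t < j.length → j.getD t 0 < j.getD (t - 1) 0 := by
  constructor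
  · intro he t ht1 ht2
    exact down_chain j i h1 t ht1 (by omega)
  · exact down_full j i h1 h2

lemma sorted_self_iff (l : List Int) :
    (PySem.List.sorted l (fun x => x) = l) ↔ List.Pairwise (· ≤ ·) l := by
  constructor
  · intro h; conv_rhs => rw [← h]
    exact PySem.List.sorted_pairwise l (fun x => x)
  · intro h; exact PySem.List.sorted_eq_self_of_pairwise l (fun x => x) h

lemma sorted_rev_iff (l : List Int) :
    ((PySem.List.sorted l (fun x => x)).reverse = l) ↔ List.Pairwise (fun a b : Int => b ≤ a) l := by
  constructor
  · intro h
    rw [← h]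
    exact List.pairwise_reverse.mpr (by simpa using PySem.List.sorted_pairwise l (fun x => x))
  · intro h
    have h1 : List.Pairwise (· ≤ ·) l.reverse := List.pairwise_reverse.mpr h
    have h2 := PySem.List.sorted_id_eq_of_perm_of_pairwise l l.reverse (List.reverse_perm l) h1
    rw [h2, List.reverse_reverse]

lemma pairwise_ge_iff_adj (l : List Int) :
    List.Pairwise (fun a b : Int => b ≤ a) l ↔
      ∀ t : Nat, t + 1 < l.length → l.getD (t + 1) 0 ≤ l.getD t 0 := by
  rw [← List.isChain_iff_pairwise, List.isChain_iff_getElem]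
  constructor
  · intro h t ht
    rw [List.getD_eq_getElem l 0 ht, List.getD_eq_getElem l 0 (show t < l.length by omega)]
    exact h t ht
  · intro h t ht
    have := h t ht
    rwa [List.getD_eq_getElem l 0 ht, List.getD_eq_getElem l 0 (show t < l.length by omega)] at this

lemma pairwise_take_iff (j : List Int) (i : Nat) (h : i ≤ j.length) :
    List.Pairwise (· ≤ ·) (j.take i) ↔ ∀ t : Nat, 0 < t → t < i → j.getD (t - 1) 0 ≤ j.getD t 0 := by
  rw [← List.isChain_iff_pairwise, List.isChain_iff_getElem]
  have hlen : (List.take i j).length = i := by simp; omega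
  constructor
  · intro hp t ht0 hti
    have h2 : t - 1 + 1 < (List.take i j).length := by omega
    have := hp (t - 1) h2
    rw [List.getElem_take, List.getElem_take] at this
    have he : t - 1 + 1 = t := by omega
    simp only [he] at this
    rwa [List.getD_eq_getElem j 0 (by omega), List.getD_eq_getElem j 0 (by omega)]
  · intro hp t ht
    rw [List.getElem_take, List.getElem_take]
    have := hp (t + 1) (by omega) (by omega)
    have he : t + 1 - 1 = t := by omega
    simp only [he] at this
    rwa [List.getD_eq_getElem j 0 (by omega), List.getD_eq_getElem j 0 (by omega)] at this

-- A's second loop counts the adjacent duplicates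
lemma cont1_eq_zero_iff (j : List Int) :
    ((PySem.List.pyRange 1 (j.length : Int) 1).foldl
      (fun c i => if PySem.List.pyGetD j i 0 = PySem.List.pyGetD j (i - 1) 0 then c + 1 else c) (0 : Int)) = 0
    ↔ NoDup2 j := by
  have hf : (fun (c : Int) (i : Int) => if PySem.List.pyGetD j i 0 = PySem.List.pyGetD j (i - 1) 0 then c + 1 else c)
      = (fun c i => if (fun x => decide (PySem.List.pyGetD j x 0 = PySem.List.pyGetD j (x - 1) 0)) i = true then c + 1 else c) := by
    funext c i; simp
  rw [hf, PySem.List.foldl_count_if]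
  simp only [zero_add, Int.natCast_eq_zero, List.countP_eq_zero]
  constructor
  · intro h t ht0 htl
    have hm : (t : Int) ∈ PySem.List.pyRange 1 (j.length : Int) 1 := by
      rw [PySem.List.mem_pyRange_one]; omega
    have := h _ hm
    simp only [decide_eq_true_eq] at this
    rw [PySem.List.pyGetD_natCast] at this
    intro he
    apply this
    rw [show ((t : Int) - 1) = ((t - 1 : Nat) : Int) by omega, PySem.List.pyGetD_natCast]
    exact he
  · intro h x hm
    rw [PySem.List.mem_pyRange_one] at hm
    simp only [decide_eq_true_eq]
    have hx : x = ((x.toNat : Nat) : Int) := by omega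
    rw [hx, PySem.List.pyGetD_natCast,
      show (((x.toNat : Nat) : Int) - 1) = ((x.toNat - 1 : Nat) : Int) by omega, PySem.List.pyGetD_natCast]
    exact h x.toNat (by omega) (by omega)

-- one-step unfolding of picLoop1 without the let bindings
lemma picLoop1_eq (j : List Int) (i : Nat) (cont : Int) :
    picLoop1 j i cont = if i < j.length + 1 then
      (if PySem.List.sorted (PySem.List.slice j none (some (i : Int))) (fun x => x)
          = picCopy (PySem.List.slice j none (some (i : Int)))
        then picLoop1 j (i + 1) (i : Int) else cont)
      else cont := by
  rw [picLoop1]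

-- A's per-iteration test: the length-i prefix is non-decreasing
lemma loop_test_iff (j : List Int) (i : Nat) (hi : i ≤ j.length) :
    (PySem.List.sorted (PySem.List.slice j none (some (i : Int))) (fun x => x)
      = picCopy (PySem.List.slice j none (some (i : Int))))
    ↔ ∀ t : Nat, 0 < t → t < i → j.getD (t - 1) 0 ≤ j.getD t 0 := by
  rw [PySem.List.slice_to_natCast]
  unfold picCopy
  rw [PySem.List.foldl_append_singleton, List.nil_append, sorted_self_iff]
  exact pairwise_take_iff j i hi

-- with no adjacent duplicates, A's prefix loop lands exactly where B's ascent scan does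
lemma loop_eq_up (j : List Int) (nd : NoDup2 j) :
    ∀ k i : Nat, j.length - i ≤ k → 2 ≤ i → i ≤ j.length → UpOn j 1 i →
      picLoop1 j (i + 1) (i : Int) = (picUp j i : Int) := by
  intro k
  induction k with
  | zero =>
    intro i hk h2 hn hup
    rw [picLoop1_eq, if_neg (by omega), picUp, if_neg (fun hc => absurd hc.1 (by omega))]
  | succ k ih =>
    intro i hk h2 hn hup
    by_cases hie : i = j.length
    · rw [picLoop1_eq, if_neg (by omega), picUp, if_neg (fun hc => absurd hc.1 (by omega))]
    · have hilt : i < j.length := by omega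
      by_cases hlt : j.getD (i - 1) 0 < j.getD i 0
      · have htest : ∀ t : Nat, 0 < t → t < i + 1 → j.getD (t - 1) 0 ≤ j.getD t 0 := by
          intro t ht0 hti
          rcases Nat.lt_or_ge t i with h | h
          · exact (hup t ht0 h).le
          · have : t = i := by omega
            subst this; exact hlt.le
        rw [picLoop1_eq, if_pos (by omega),
          if_pos ((loop_test_iff j (i + 1) (by omega)).mpr htest)]
        have hupstep : picUp j i = picUp j (i + 1) := by
          rw [picUp, if_pos ⟨hilt, by
            rw [pyGetD_pred j i (by omega), PySem.List.pyGetD_natCast j i 0]; exact hlt⟩]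
        have hup' : UpOn j 1 (i + 1) := by
          intro t ht0 hti
          rcases Nat.lt_or_ge t i with h | h
          · exact hup t ht0 h
          · have : t = i := by omega
            subst this; exact hlt
        rw [hupstep]
        exact ih (i + 1) (by omega) (by omega) (by omega) hup'
      · have hne := nd i (by omega) hilt
        have hgt : ¬ (j.getD (i - 1) 0 ≤ j.getD i 0) := by
          intro hle
          rcases lt_or_eq_of_le hle with h | h
          · exact hlt h
          · exact hne h.symm
        have htest : ¬ ∀ t : Nat, 0 < t → t < i + 1 → j.getD (t - 1) 0 ≤ j.getD t 0 := by
          intro hall; exact hgt (hall i (by omega) (by omega))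
        rw [picLoop1_eq, if_pos (by omega),
          if_neg (fun hs => htest ((loop_test_iff j (i + 1) (by omega)).mp hs)),
          picUp, if_neg (fun hc => by
            rw [pyGetD_pred j i (by omega), PySem.List.pyGetD_natCast j i 0] at hc
            exact hlt hc.2)]

-- the suffix test of A, translated to adjacent descents, given no adjacent duplicates
lemma drop_desc_iff (j : List Int) (u : Nat) (h2 : 2 ≤ u) (hun : u < j.length) (nd : NoDup2 j) :
    List.Pairwise (fun a b : Int => b ≤ a) (j.drop (u - 1))
    ↔ ∀ t : Nat, u ≤ t → t < j.length → j.getD t 0 < j.getD (t - 1) 0 := by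
  rw [pairwise_ge_iff_adj]
  have hlen : (j.drop (u - 1)).length = j.length - (u - 1) := by simp
  constructor
  · intro h t ht1 ht2
    have hs : (t - u) + 1 < (j.drop (u - 1)).length := by omega
    have := h (t - u) hs
    rw [List.getD_eq_getElem _ 0 hs, List.getD_eq_getElem _ 0 (by omega),
      List.getElem_drop, List.getElem_drop] at this
    have he1 : u - 1 + (t - u + 1) = t := by omega
    have he2 : u - 1 + (t - u) = t - 1 := by omega
    simp only [he1, he2] at this
    have hne := nd t (by omega) ht2
    rw [List.getD_eq_getElem j 0 (by omega), List.getD_eq_getElem j 0 (by omega)] at hne ⊢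
    omega
  · intro h s hs
    rw [List.getD_eq_getElem _ 0 hs, List.getD_eq_getElem _ 0 (by omega),
      List.getElem_drop, List.getElem_drop]
    have hd := h (u + s) (by omega) (by omega)
    rw [List.getD_eq_getElem j 0 (by omega), List.getD_eq_getElem j 0 (by omega)] at hd
    have he1 : u - 1 + (s + 1) = u + s := by omega
    have he2 : u + s - 1 = u - 1 + s := by omega
    simp only [he1]
    simp only [he2] at hd
    exact hd.le

-- ===== VERDICT (by name: the statement is the Claim_ definition above) =====
theorem pic_spec : Claim_equal_pic := by
  intro j _
  unfold Spec_pic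
  by_cases hn2 : j.length < 2
  · have hcont : picLoop1 j 2 0 = 0 := by
      rw [picLoop1_eq, if_neg (by omega)]
    have hu : picUp j 1 = 1 := by
      rw [picUp, if_neg (fun hc => absurd hc.1 (by omega))]
    simp [pic, pic_alt, hcont, hu]
  · replace hn2 : 2 ≤ j.length := by omega
    by_cases hnd : NoDup2 j
    · have hc1 := (cont1_eq_zero_iff j).mpr hnd
      by_cases hlt : j.getD 0 0 < j.getD 1 0
      · -- strictly rising start: A's cont = B's ascent end u
        have hg0 : PySem.List.pyGetD j ((1 : Nat) : Int) 0 = j.getD 1 0 :=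
          PySem.List.pyGetD_natCast j 1 0
        have hu12 : picUp j 1 = picUp j 2 := by
          rw [picUp, if_pos ⟨by omega, by
            rw [pyGetD_pred j 1 (le_refl 1), hg0]; exact hlt⟩]
        have hup2 : UpOn j 1 2 := by
          intro t ht1 ht2
          have : t = 1 := by omega
          subst this; exact hlt
        have hcont : picLoop1 j 2 0 = ((picUp j 1 : Nat) : Int) := by
          have htest2 : ∀ t : Nat, 0 < t → t < 2 → j.getD (t - 1) 0 ≤ j.getD t 0 := by
            intro t ht1 ht2
            have : t = 1 := by omega
            subst this; exact hlt.le
          rw [show (2 : Nat) = 1 + 1 by rfl] at *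
          rw [picLoop1_eq, if_pos (by omega),
            if_pos ((loop_test_iff j (1 + 1) (by omega)).mpr htest2), hu12]
          exact loop_eq_up j hnd j.length (1 + 1) (by omega) (by omega) (by omega) hup2
        have hu2 : 2 ≤ picUp j 1 := by rw [hu12]; exact up_ge j 2
        have hun : picUp j 1 ≤ j.length := up_le j 1 (by omega)
        by_cases hue : picUp j 1 = j.length
        · simp [pic, pic_alt, hcont, hc1, hue]
        · have hultn : picUp j 1 < j.length := by omega
          have hk3 : PySem.List.slice j (some (((picUp j 1 : Nat) : Int) - 1)) none
              = j.drop (picUp j 1 - 1) := by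
            rw [show (((picUp j 1 : Nat) : Int) - 1) = ((picUp j 1 - 1 : Nat) : Int) by omega,
              PySem.List.slice_from_natCast]
          have hcopy : picCopy (j.drop (picUp j 1 - 1)) = j.drop (picUp j 1 - 1) := by
            unfold picCopy
            rw [PySem.List.foldl_append_singleton, List.nil_append]
          have hiff : ((PySem.List.sorted (j.drop (picUp j 1 - 1)) (fun x => x)).reverse
              = j.drop (picUp j 1 - 1)) ↔ picDown j (picUp j 1) = j.length := by
            rw [sorted_rev_iff, drop_desc_iff j (picUp j 1) hu2 hultn hnd,
              down_eq_iff j (picUp j 1) (by omega) hun]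
          have hA1 : ¬(((picUp j 1 : Nat) : Int) = 0 ∨ ((picUp j 1 : Nat) : Int) = (j.length : Int)
              ∨ ¬((PySem.List.pyRange 1 (j.length : Int) 1).foldl
                  (fun c i => if PySem.List.pyGetD j i 0 = PySem.List.pyGetD j (i - 1) 0 then c + 1 else c) (0 : Int)) = 0) := by
            intro h
            rcases h with h | h | h
            · omega
            · omega
            · exact h hc1
          have hB1 : ¬(picUp j 1 = 1 ∨ picUp j 1 = j.length) := by omega
          simp only [pic, pic_alt, hcont, hk3, hcopy]
          rw [if_neg hA1, if_neg hB1]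
          by_cases hdown : picDown j (picUp j 1) = j.length
          · rw [if_pos (hiff.mpr hdown), if_pos hdown]
          · rw [if_neg (fun hs => hdown (hiff.mp hs)), if_neg hdown]
      · -- first step not rising: A's cont = 0, B's ascent stops at 1
        have hne := hnd 1 (by omega) (by omega)
        have hcont : picLoop1 j 2 0 = 0 := by
          have htest : ¬ ∀ t : Nat, 0 < t → t < 2 → j.getD (t - 1) 0 ≤ j.getD t 0 := by
            intro hall
            have := hall 1 (by omega) (by omega)
            simp only [Nat.sub_self] at this
            rcases lt_or_eq_of_le this with h | h
            · exact hlt h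
            · exact hne h.symm
          rw [picLoop1_eq, if_pos (by omega),
            if_neg (fun hs => htest ((loop_test_iff j 2 (by omega)).mp hs))]
        have hu : picUp j 1 = 1 := by
          rw [picUp, if_neg (fun hc => by
            rw [pyGetD_pred j 1 (le_refl 1), PySem.List.pyGetD_natCast j 1 0] at hc
            exact hlt hc.2)]
        simp [pic, pic_alt, hcont, hu]
    · -- an adjacent duplicate: A sees cont1 ≠ 0, B's scans cannot cover the list
      have hc1 : ¬ ((PySem.List.pyRange 1 (j.length : Int) 1).foldl
          (fun c i => if PySem.List.pyGetD j i 0 = PySem.List.pyGetD j (i - 1) 0 then c + 1 else c) (0 : Int)) = 0 :=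
        fun h => hnd ((cont1_eq_zero_iff j).mp h)
      have hA : pic j = "N" := by
        simp only [pic]
        rw [if_pos (Or.inr (Or.inr hc1))]
      rw [hA]
      -- B also returns "N"
      have hex : ∃ t : Nat, 0 < t ∧ t < j.length ∧ j.getD t 0 = j.getD (t - 1) 0 := by
        by_contra hno
        apply hnd
        intro t ht0 htl he
        exact hno ⟨t, ht0, htl, he⟩
      obtain ⟨t, ht0, htl, hte⟩ := hex
      by_cases hu1 : picUp j 1 = 1 ∨ picUp j 1 = j.length
      · simp only [pic_alt]
        rw [if_pos hu1]
      · have hu1a : picUp j 1 ≠ 1 := fun h => hu1 (Or.inl h)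
        have hu1b : picUp j 1 ≠ j.length := fun h => hu1 (Or.inr h)
        have hge := up_ge j 1
        have hdown : picDown j (picUp j 1) ≠ j.length := by
          intro hdn
          rcases Nat.lt_or_ge t (picUp j 1) with h | h
          · have := up_chain j 1 (le_refl 1) t (by omega) h
            omega
          · have := down_chain j (picUp j 1) (by omega) t h (by omega)
            omega
        simp only [pic_alt]
        rw [if_neg hu1, if_neg hdown]
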